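-- pv_equiv track=rewrite | github.com/ian-ie/leetcode | 1769.minimum-number-of-operations-to-move-all-balls-to-each-box.py | minOperations
-- ===== SOURCE A (Python) =====
-- from typing import List
--
-- def minOperations(boxes: str) -> List[int]:
--     left, right, opt = int(boxes[0]), 0, 0
--     for i in range(1, len(boxes)):
--         if boxes[i] == "1":
--             right += 1
--             opt += i
--     res = [opt]
--     for i in range(1, len(boxes)):
--         opt += left - right
--         if boxes[i] == "1":
--             left += 1
--             right -= 1
--         res.append(opt)
--
--     return res
-- ===== SOURCE B (Python) =====
-- def minOperations(boxes: str) -> list: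
--     ones = [j for j, c in enumerate(boxes) if c == "1"]
--     return [sum(abs(i - j) for j in ones) for i in range(len(boxes))]
-- ===== Notes on version B (the rewrite author's own statement) =====
-- stated objective: simpler
-- what changed: Replaces A's single-pass incremental left/right/opt bookkeeping with the direct definition: collect the indices of '1' boxes once, then for each position i return the sum of |i - j| over those indices.
-- outside the precondition, e.g. on minOperations('21'): A returns [1, 2], B returns [1, 0]; on minOperations('9001'): A returns [3, 11, 19, 27], B returns [3, 2, 1, 0]
import Mathlib
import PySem

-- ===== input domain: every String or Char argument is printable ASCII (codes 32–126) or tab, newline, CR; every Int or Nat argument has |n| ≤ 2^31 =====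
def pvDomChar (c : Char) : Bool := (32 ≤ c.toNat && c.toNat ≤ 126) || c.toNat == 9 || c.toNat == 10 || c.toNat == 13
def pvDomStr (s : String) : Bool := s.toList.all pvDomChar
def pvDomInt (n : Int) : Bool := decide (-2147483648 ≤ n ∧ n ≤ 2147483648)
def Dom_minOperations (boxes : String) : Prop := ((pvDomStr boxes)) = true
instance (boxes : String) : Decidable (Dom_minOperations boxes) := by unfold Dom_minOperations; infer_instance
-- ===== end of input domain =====

-- B replaces A's incremental left/right/opt bookkeeping by the direct definition (indices of
-- '1' boxes collected once, then the sum of |i - j| per position); equally valid, not faster.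

-- ===== PORT A =====
def minOperations (boxes : String) : List Int :=
  let cs := boxes.toList
  -- left = int(boxes[0]): boxes[0] raises IndexError on "" and int() raises ValueError on a
  -- non-digit first character — both are `none` here and excluded by Pre_; `getD 0` is unreached.
  let left : Int := ((PySem.List.pyGet? cs 0).bind (fun ch => PySem.Int.ofChars? [ch])).getD 0
  let ro := (PySem.List.pyRange 1 (cs.length : Int) 1).foldl
      (fun (rp : Int × Int) i =>
        if PySem.List.pyGetD cs i ' ' = '1' then (rp.1 + 1, rp.2 + i) else rp) (0, 0)
  let st := (PySem.List.pyRange 1 (cs.length : Int) 1).foldl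
      (fun (s : Int × Int × Int × List Int) i =>
        let opt := s.2.2.1 + s.1 - s.2.1
        if PySem.List.pyGetD cs i ' ' = '1' then
          (s.1 + 1, s.2.1 - 1, opt, s.2.2.2 ++ [opt])
        else
          (s.1, s.2.1, opt, s.2.2.2 ++ [opt]))
      (left, ro.1, ro.2, [ro.2])
  st.2.2.2

-- ===== PORT B =====
-- `ones = [j for j, c in enumerate(boxes) if c == "1"]`
def pvOnes (cs : List Char) (a : Int) : List Int :=
  ((PySem.List.enumerate cs a).filter (fun p => p.2 == '1')).map (fun p => p.1)

def minOperations_alt (boxes : String) : List Int :=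
  let ones := pvOnes boxes.toList 0
  (PySem.List.pyRange 0 (boxes.toList.length : Int) 1).map
    (fun i => (ones.map (fun j => |i - j|)).sum)

-- ===== PRECONDITION & SPEC =====
-- Pre_ excludes the empty string and strings whose first character is not '0' or '1': A raises
-- (IndexError / ValueError via int(boxes[0])) on an empty or non-digit-first string, and on a
-- first character '2'–'9' A seeds its `left` counter with the digit's value — on such non-binary
-- box strings A's reading ('9' = nine balls in box 0) and B's ('9' is not a ball) are both
-- defensible choices no caller of this binary-string task would specify.
def Pre_minOperations (boxes : String) : Prop :=
  boxes.toList ≠ [] ∧ (boxes.toList.headD '0' = '0' ∨ boxes.toList.headD '0' = '1')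
instance (boxes : String) : Decidable (Pre_minOperations boxes) := by
  unfold Pre_minOperations; infer_instance

def pvWitness_minOperations : String := "110"

def Spec_minOperations (boxes : String) (out : List Int) : Prop := out = minOperations_alt boxes
instance (boxes : String) (out : List Int) : Decidable (Spec_minOperations boxes out) := by
  unfold Spec_minOperations; infer_instance

-- ===== CLAIM (what is proved, stated in full; the proofs are below) =====
def Claim_equal_minOperations : Prop := ∀ (boxes : String), Dom_minOperations boxes → Pre_minOperations boxes → Spec_minOperations boxes (minOperations boxes)

-- ===== LEMMAS AND PROOFS =====

-- B's per-position value as a function of the collected indices.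
def pvF (O : List Int) (i : Int) : Int := (O.map (fun j => |i - j|)).sum

theorem pvOnes_nil (a : Int) : pvOnes [] a = [] := by
  simp [pvOnes, PySem.List.enumerate_nil]

theorem pvOnes_cons (c : Char) (t : List Char) (a : Int) :
    pvOnes (c :: t) a = (if c = '1' then [a] else []) ++ pvOnes t (a + 1) := by
  by_cases hc : c = '1' <;>
    simp [pvOnes, PySem.List.enumerate_cons, List.filter_cons, hc]

theorem pvOnes_mem : ∀ (t : List Char) (a j : Int), j ∈ pvOnes t a → a ≤ j := by
  intro t
  induction t with
  | nil => intro a j h; simp [pvOnes_nil] at h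
  | cons c t ih =>
    intro a j h
    rw [pvOnes_cons] at h
    rcases List.mem_append.mp h with h | h
    · by_cases hc : c = '1' <;> simp [hc] at h; omega
    · have := ih (a + 1) j h; omega

-- for i in range(a, len(cs)): … cs[i] …  ≡  a fold over the enumerated suffix.
theorem pvRangeFold {sigma : Type} (g : sigma → Int → Char → sigma) (d : Char) (cs : List Char) :
    ∀ (t : List Char) (a : Nat) (s : sigma), cs.drop a = t →
      (PySem.List.pyRange (a : Int) (cs.length : Int) 1).foldl
          (fun acc i => g acc i (PySem.List.pyGetD cs i d)) s
        = (PySem.List.enumerate t (a : Int)).foldl (fun acc p => g acc p.1 p.2) s := by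
  intro t
  induction t with
  | nil =>
    intro a s h
    have hle : cs.length ≤ a := List.drop_eq_nil_iff.mp h
    rw [PySem.List.pyRange_one_eq_nil (by exact_mod_cast hle)]
    simp [PySem.List.enumerate_nil]
  | cons x t ih =>
    intro a s h
    have hlt : a < cs.length := by
      by_contra hge
      have h0 : cs.drop a = [] := List.drop_eq_nil_iff.mpr (by omega)
      rw [h0] at h
      exact List.cons_ne_nil x t h.symm
    have hcons := List.drop_eq_getElem_cons hlt
    rw [h] at hcons
    injection hcons with h1 h2
    have hx : cs[a] = x := h1.symm
    have hdrop : cs.drop (a + 1) = t := h2.symm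
    rw [PySem.List.pyRange_one_cons (by exact_mod_cast hlt)]
    have hget : PySem.List.pyGetD cs (a : Int) d = x := by
      rw [PySem.List.pyGetD_natCast]
      simp [List.getD, hlt, hx]
    simp only [List.foldl_cons, hget, PySem.List.enumerate_cons]
    have := ih (a + 1) (g s (a : Int) x) hdrop
    push_cast at this ⊢
    exact this

-- first loop: counts and index-sum of the '1' positions of the suffix.
theorem pvLoop1 : ∀ (t : List Char) (a r o : Int),
    (PySem.List.enumerate t a).foldl
        (fun (rp : Int × Int) p => if p.2 = '1' then (rp.1 + 1, rp.2 + p.1) else rp) (r, o)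
      = (r + ((pvOnes t a).length : Int), o + (pvOnes t a).sum) := by
  intro t
  induction t with
  | nil => intro a r o; simp [PySem.List.enumerate_nil, pvOnes_nil]
  | cons c t ih =>
    intro a r o
    rw [PySem.List.enumerate_cons, List.foldl_cons, pvOnes_cons]
    by_cases hc : c = '1'
    · rw [if_pos hc, if_pos hc, ih]
      refine Prod.ext ?_ ?_ <;> simp <;> push_cast <;> ring
    · rw [if_neg hc, if_neg hc, ih]
      simp

theorem pvAbs_step (i j : Int) :
    |i - j| = |i - 1 - j| + (if j < i then 1 else -1) := by
  by_cases h : j < i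
  · rw [abs_of_nonneg (by omega), abs_of_nonneg (by omega), if_pos h]
    omega
  · rw [abs_of_nonpos (by omega), abs_of_nonpos (by omega), if_neg h]
    omega

theorem pvF_step (O : List Int) (i : Int) :
    pvF O i = pvF O (i - 1) + ((O.filter (fun j => decide (j < i))).length : Int)
      - ((O.filter (fun j => decide (i ≤ j))).length : Int) := by
  induction O with
  | nil => simp [pvF]
  | cons j O ih =>
    simp only [pvF, List.map_cons, List.sum_cons, List.filter_cons] at ih ⊢
    rw [pvAbs_step i j]
    by_cases h : j < i
    · have h2 : ¬ i ≤ j := by omega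
      rw [if_pos h]
      simp only [h, h2, decide_true, decide_false, if_true, if_false, List.length_cons]
      push_cast
      linarith [ih]
    · have h2 : i ≤ j := by omega
      rw [if_neg h]
      simp only [h, h2, decide_true, decide_false, if_true, if_false, List.length_cons]
      push_cast
      linarith [ih]

theorem pvFilter_lt (P S : List Int) (i : Int)
    (hP : ∀ j ∈ P, j < i) (hS : ∀ j ∈ S, i ≤ j) :
    (P ++ S).filter (fun j => decide (j < i)) = P := by
  rw [List.filter_append, List.filter_eq_self.mpr (by intro a ha; simpa using hP a ha),
    List.filter_eq_nil_iff.mpr (by intro a ha; simp; exact hS a ha)]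
  simp

theorem pvFilter_ge (P S : List Int) (i : Int)
    (hP : ∀ j ∈ P, j < i) (hS : ∀ j ∈ S, i ≤ j) :
    (P ++ S).filter (fun j => decide (i ≤ j)) = S := by
  rw [List.filter_append, List.filter_eq_nil_iff.mpr (by intro a ha; simp; exact hP a ha),
    List.filter_eq_self.mpr (by intro a ha; simpa using hS a ha)]
  simp

theorem pvF_zero (O : List Int) (h : ∀ j ∈ O, 0 ≤ j) : pvF O 0 = O.sum := by
  induction O with
  | nil => simp [pvF]
  | cons j O ih =>
    simp only [pvF, List.map_cons, List.sum_cons] at ih ⊢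
    rw [abs_of_nonpos (by have := h j (by simp); omega),
      ih (fun a ha => h a (by simp [ha]))]
    omega

-- second loop: with `left`/`right`/`opt` describing position i, the appended values are
-- exactly pvF of the full ones-list at positions i, i+1, …
theorem pvLoop2 : ∀ (t : List Char) (i : Int) (P res : List Int) (L R O' : Int),
    (∀ j ∈ P, j < i) → L = (P.length : Int) → R = ((pvOnes t i).length : Int) →
    O' = pvF (P ++ pvOnes t i) (i - 1) →
    (t.foldl (fun (s : Int × Int × Int × List Int) ch =>
        let opt := s.2.2.1 + s.1 - s.2.1
        if ch = '1' then (s.1 + 1, s.2.1 - 1, opt, s.2.2.2 ++ [opt])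
        else (s.1, s.2.1, opt, s.2.2.2 ++ [opt])) (L, R, O', res)).2.2.2
      = res ++ (PySem.List.pyRange i (i + (t.length : Int)) 1).map (pvF (P ++ pvOnes t i)) := by
  intro t
  induction t with
  | nil =>
    intro i P res L R O' _ _ _ _
    simp [PySem.List.pyRange_one_eq_nil (by omega : i + ((0:Nat):Int) ≤ i)]
  | cons c t ih =>
    intro i P res L R O' hP hL hR hO
    have hmem : ∀ j ∈ pvOnes (c :: t) i, i ≤ j := fun j hj => pvOnes_mem _ _ _ hj
    have hopt : O' + L - R = pvF (P ++ pvOnes (c :: t) i) i := by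
      have hstep := pvF_step (P ++ pvOnes (c :: t) i) i
      rw [pvFilter_lt P _ i hP hmem, pvFilter_ge P _ i hP hmem] at hstep
      rw [hstep, hO, hL, hR]
    have hbound : i + (((c :: t).length : Nat) : Int) = (i + 1) + (t.length : Int) := by
      rw [List.length_cons]
      push_cast
      ring
    by_cases hc : c = '1'
    · simp only [List.foldl_cons, if_pos hc]
      have hones : pvOnes (c :: t) i = [i] ++ pvOnes t (i + 1) := by
        rw [pvOnes_cons]
        simp [hc]
      have happ : P ++ pvOnes (c :: t) i = (P ++ [i]) ++ pvOnes t (i + 1) := by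
        rw [hones, List.append_assoc]
      rw [ih (i + 1) (P ++ [i]) (res ++ [O' + L - R]) (L + 1) (R - 1) (O' + L - R)
          (by intro j hj
              rcases List.mem_append.mp hj with hj' | hj'
              · have := hP j hj'; omega
              · simp at hj'; omega)
          (by rw [hL, List.length_append, List.length_singleton]; push_cast; omega)
          (by rw [hR, hones, List.length_append, List.length_singleton]; push_cast; omega)
          (by rw [hopt, happ]; norm_num)]
      rw [hbound]
      conv_rhs => rw [PySem.List.pyRange_one_cons (show i < i + 1 + (t.length : Int) by omega)]
      rw [List.map_cons, ← happ, ← hopt]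
      simp [List.append_assoc]
    · simp only [List.foldl_cons, if_neg hc]
      have hones : pvOnes (c :: t) i = pvOnes t (i + 1) := by
        rw [pvOnes_cons]
        simp [hc]
      rw [ih (i + 1) P (res ++ [O' + L - R]) L R (O' + L - R)
          (by intro j hj; have := hP j hj; omega)
          hL
          (by rw [hR, hones])
          (by rw [hopt, hones]; norm_num)]
      rw [hbound]
      conv_rhs => rw [PySem.List.pyRange_one_cons (show i < i + 1 + (t.length : Int) by omega)]
      rw [List.map_cons, ← hones, ← hopt]
      simp [List.append_assoc]

theorem pvF_eta (O : List Int) : (fun i => (List.map (fun j => |i - j|) O).sum) = pvF O := rfl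

theorem pvLeft_val (c : Char) (t : List Char) (hc : c = '0' ∨ c = '1') :
    ((PySem.List.pyGet? (c :: t) 0).bind (fun ch => PySem.Int.ofChars? [ch])).getD 0
      = (((if c = '1' then [(0 : Int)] else []).length : Int)) := by
  rcases hc with h | h <;> subst h <;> rw [PySem.List.pyGet?_zero_cons] <;> rfl

theorem minOperations_spec : Claim_equal_minOperations := by
  intro boxes _ hpre
  rcases hpre with ⟨hne, hhead⟩
  unfold Spec_minOperations
  rcases hcs : boxes.toList with _ | ⟨c, t⟩
  · exact absurd hcs hne
  rw [hcs] at hhead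
  simp only [List.headD_cons] at hhead
  simp only [minOperations, minOperations_alt, hcs]
  have hmem0 : ∀ j ∈ pvOnes (c :: t) 0, 0 ≤ j := fun j hj => pvOnes_mem _ _ _ hj
  have hOnes : pvOnes (c :: t) 0 = (if c = '1' then [(0 : Int)] else []) ++ pvOnes t 1 := by
    rw [pvOnes_cons]
    norm_num
  have hP0 : ∀ j ∈ (if c = '1' then [(0 : Int)] else []), j < 1 := by
    by_cases h : c = '1' <;> simp [h]
  -- first loop
  have hb1 := pvRangeFold
      (fun (rp : Int × Int) i ch => if ch = '1' then (rp.1 + 1, rp.2 + i) else rp)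
      ' ' (c :: t) t 1 ((0 : Int), (0 : Int)) rfl
  beta_reduce at hb1
  rw [Nat.cast_one, pvLoop1 t 1 0 0] at hb1
  rw [hb1, pvLeft_val c t hhead]
  simp only [zero_add]
  -- second loop, bridged to a fold over the characters
  have hb2 := pvRangeFold
      (fun (s : Int × Int × Int × List Int) (i : Int) ch =>
        let opt := s.2.2.1 + s.1 - s.2.1
        if ch = '1' then (s.1 + 1, s.2.1 - 1, opt, s.2.2.2 ++ [opt])
        else (s.1, s.2.1, opt, s.2.2.2 ++ [opt]))
      ' ' (c :: t) t 1
      ((((if c = '1' then [(0 : Int)] else []).length : Int)),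
        ((pvOnes t 1).length : Int), (pvOnes t 1).sum, [(pvOnes t 1).sum]) rfl
  beta_reduce at hb2
  rw [Nat.cast_one] at hb2
  rw [hb2]
  have hfold := List.foldl_map (f := fun (p : Int × Char) => p.2)
      (g := fun (s : Int × Int × Int × List Int) ch =>
        let opt := s.2.2.1 + s.1 - s.2.1
        if ch = '1' then (s.1 + 1, s.2.1 - 1, opt, s.2.2.2 ++ [opt])
        else (s.1, s.2.1, opt, s.2.2.2 ++ [opt]))
      (l := PySem.List.enumerate t 1)
      (init := ((((if c = '1' then [(0 : Int)] else []).length : Int)),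
        ((pvOnes t 1).length : Int), (pvOnes t 1).sum, [(pvOnes t 1).sum]))
  rw [PySem.List.map_snd_enumerate] at hfold
  beta_reduce at hfold
  rw [← hfold]
  have hsum : (pvOnes t 1).sum
      = pvF ((if c = '1' then [(0 : Int)] else []) ++ pvOnes t 1) 0 := by
    rw [← hOnes, pvF_zero _ hmem0, hOnes]
    by_cases h : c = '1' <;> simp [h]
  rw [pvLoop2 t 1 (if c = '1' then [(0 : Int)] else []) [(pvOnes t 1).sum]
      ((((if c = '1' then [(0 : Int)] else []).length : Int)))
      (((pvOnes t 1).length : Int)) ((pvOnes t 1).sum)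
      hP0 rfl rfl (by rw [hsum]; norm_num)]
  -- B side
  rw [pvF_eta, hOnes]
  conv_rhs => rw [PySem.List.pyRange_one_cons
      (show (0 : Int) < ((c :: t).length : Int) by
        rw [List.length_cons]; push_cast; omega)]
  rw [List.map_cons, show (0 : Int) + 1 = 1 by ring,
    show ((c :: t).length : Int) = 1 + (t.length : Int) by
      rw [List.length_cons]; push_cast; ring]
  rw [← hsum]
  simp
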